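-- pv_equiv track=rewrite | github.com/Gabriele-mp/FDS-DITTO-DATI | src/feature_builder_Model2.py | calculate_trap_kos
-- ===== SOURCE A (Python) =====
-- TRAP_KO_MOVES = {'counter', 'bide'}
--
-- def calculate_trap_kos(timeline):
--     p1_trap_kos = 0
--     p2_trap_kos = 0
--     p1_fainted_names = set()
--     p2_fainted_names = set()
--     for turn in timeline:
--         p1_state = turn.get('p1_pokemon_state')
--         p2_state = turn.get('p2_pokemon_state')
--         p1_move = turn.get('p1_move_details')
--         p2_move = turn.get('p2_move_details')
--         if p1_move and p2_state and p1_move.get('name') in TRAP_KO_MOVES: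
--             if p2_state.get('status') == 'fnt' and p2_state['name'] not in p2_fainted_names:
--                 p1_trap_kos += 1
--                 p2_fainted_names.add(p2_state['name'])
--         if p2_move and p1_state and p2_move.get('name') in TRAP_KO_MOVES:
--             if p1_state.get('status') == 'fnt' and p1_state['name'] not in p1_fainted_names:
--                 p2_trap_kos += 1
--                 p1_fainted_names.add(p1_state['name'])
--         if p1_state and p1_state.get('status') == 'fnt': p1_fainted_names.add(p1_state['name'])
--         if p2_state and p2_state.get('status') == 'fnt': p2_fainted_names.add(p2_state['name'])
--     return {'trap_ko_advantage': p1_trap_kos - p2_trap_kos}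
-- ===== SOURCE B (Python) =====
-- TRAP_KO_MOVES = {'counter', 'bide'}
--
-- def calculate_trap_kos(timeline):
--     def trap_count(state_key, move_key):
--         # Stage 1: distinct names that ever faint for this player, in first-faint order.
--         names = []
--         for turn in timeline:
--             st = turn.get(state_key)
--             if st and st.get('status') == 'fnt':
--                 n = st['name']
--                 if n not in names:
--                     names.append(n)
--         # Stage 2: per name, locate its first fainted turn and test the opposing move there.
--         total = 0
--         for name in names:
--             for turn in timeline:
--                 st = turn.get(state_key)
--                 if st and st.get('status') == 'fnt' and st['name'] == name:
--                     mv = turn.get(move_key)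
--                     if mv and mv.get('name') in TRAP_KO_MOVES:
--                         total += 1
--                     break
--         return total
--     p1_trap_kos = trap_count('p2_pokemon_state', 'p1_move_details')
--     p2_trap_kos = trap_count('p1_pokemon_state', 'p2_move_details')
--     return {'trap_ko_advantage': p1_trap_kos - p2_trap_kos}
-- ===== Notes on version B (the rewrite author's own statement) =====
-- stated objective: alternative
-- what changed: Replaces A's single interleaved pass with incremental counters and fainted-name sets by a staged per-name computation: per player, first collect the distinct names that ever faint, then for each name scan the timeline for its first fainted turn (break on hit) and count it iff the opposing move there is a trap move; returns p1 minus p2.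
import Mathlib
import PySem

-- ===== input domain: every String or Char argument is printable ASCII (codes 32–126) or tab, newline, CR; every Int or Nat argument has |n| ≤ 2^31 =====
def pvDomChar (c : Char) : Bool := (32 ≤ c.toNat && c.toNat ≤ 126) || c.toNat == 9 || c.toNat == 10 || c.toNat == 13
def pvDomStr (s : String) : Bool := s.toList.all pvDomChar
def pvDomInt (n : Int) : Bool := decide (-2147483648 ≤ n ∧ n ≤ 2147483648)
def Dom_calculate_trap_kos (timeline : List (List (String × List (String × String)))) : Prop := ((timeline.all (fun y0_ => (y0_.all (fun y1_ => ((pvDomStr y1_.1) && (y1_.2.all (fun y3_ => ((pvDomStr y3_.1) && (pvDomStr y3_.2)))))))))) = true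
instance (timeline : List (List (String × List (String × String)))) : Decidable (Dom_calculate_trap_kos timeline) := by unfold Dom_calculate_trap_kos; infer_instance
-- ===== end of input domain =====

-- B replaces A's single interleaved pass (counters + fainted-name sets) by a staged,
-- per-name computation: first collect each player's distinct fainted names, then for each
-- name scan for its first fainted turn and test the opposing move there; objective:
-- alternative decomposition, not claimed faster.

-- shared transliteration helpers (turn.get, dict truthiness, d.get(k), trap-move test)
def pvGetK (turn : List (String × List (String × String))) (k : String) :
    Option (List (String × String)) := (PySem.Dict.mk turn).get? k

def pvTruthy : Option (List (String × String)) → Bool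
  | none => false
  | some l => !l.isEmpty

def pvField (o : Option (List (String × String))) (k : String) : Option String :=
  match o with
  | none => none
  | some st => (PySem.Dict.mk st).get? k

-- st['name']; the .getD "" arm is unreachable under Pre_ (Python raises KeyError there)
def pvName (o : Option (List (String × String))) : String := (pvField o "name").getD ""

-- move.get('name') in TRAP_KO_MOVES
def pvTrapOpt : Option String → Bool
  | some s => s == "counter" || s == "bide"
  | none => false

-- ===== PORT A =====
def stepA (acc : Int × Int × PySem.Set String × PySem.Set String)
    (turn : List (String × List (String × String))) :
    Int × Int × PySem.Set String × PySem.Set String :=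
  let (p1k, p2k, f1, f2) := acc
  let p1s := pvGetK turn "p1_pokemon_state"
  let p2s := pvGetK turn "p2_pokemon_state"
  let p1m := pvGetK turn "p1_move_details"
  let p2m := pvGetK turn "p2_move_details"
  -- 'if A: if B: p1_trap_kos += 1; add' — the two assignments written componentwise
  let p1k :=
    if pvTruthy p1m && pvTruthy p2s && pvTrapOpt (pvField p1m "name") then
      if (pvField p2s "status" == some "fnt") && !(PySem.Set.contains f2 (pvName p2s)) then p1k + 1 else p1k
    else p1k
  let f2 :=
    if pvTruthy p1m && pvTruthy p2s && pvTrapOpt (pvField p1m "name") then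
      if (pvField p2s "status" == some "fnt") && !(PySem.Set.contains f2 (pvName p2s)) then
        PySem.Set.add f2 (pvName p2s)
      else f2
    else f2
  let p2k :=
    if pvTruthy p2m && pvTruthy p1s && pvTrapOpt (pvField p2m "name") then
      if (pvField p1s "status" == some "fnt") && !(PySem.Set.contains f1 (pvName p1s)) then p2k + 1 else p2k
    else p2k
  let f1 :=
    if pvTruthy p2m && pvTruthy p1s && pvTrapOpt (pvField p2m "name") then
      if (pvField p1s "status" == some "fnt") && !(PySem.Set.contains f1 (pvName p1s)) then
        PySem.Set.add f1 (pvName p1s)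
      else f1
    else f1
  let f1 := if pvTruthy p1s && (pvField p1s "status" == some "fnt") then PySem.Set.add f1 (pvName p1s) else f1
  let f2 := if pvTruthy p2s && (pvField p2s "status" == some "fnt") then PySem.Set.add f2 (pvName p2s) else f2
  (p1k, p2k, f1, f2)

def calculate_trap_kos (timeline : List (List (String × List (String × String)))) : List (String × Int) :=
  let r := timeline.foldl stepA (0, 0, PySem.Set.empty, PySem.Set.empty)
  [("trap_ko_advantage", r.1 - r.2.1)]

-- ===== PORT B =====
-- stage 1 of trap_count: the player's distinct fainted names, in first-faint order
def collectNames (timeline : List (List (String × List (String × String)))) (stateKey : String) :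
    List String :=
  timeline.foldl (fun ns turn =>
    let st := pvGetK turn stateKey
    if pvTruthy st && (pvField st "status" == some "fnt") then
      if pvName st ∈ ns then ns else ns ++ [pvName st]
    else ns) []

-- the inner-loop guard of stage 2: this turn is a fainted turn of `name`
def faintPred (stateKey name : String) (turn : List (String × List (String × String))) : Bool :=
  let st := pvGetK turn stateKey
  pvTruthy st && (pvField st "status" == some "fnt") && (pvName st == name)

-- stage 2, one name: scan to the first fainted turn (the `break`), test the opposing move
def trapHit (timeline : List (List (String × List (String × String))))
    (stateKey moveKey name : String) : Bool :=
  match timeline.find? (faintPred stateKey name) with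
  | some turn =>
      let mv := pvGetK turn moveKey
      pvTruthy mv && pvTrapOpt (pvField mv "name")
  | none => false

-- trap_count(state_key, move_key)
def trapCount (timeline : List (List (String × List (String × String))))
    (stateKey moveKey : String) : Int :=
  (((collectNames timeline stateKey).countP (trapHit timeline stateKey moveKey) : Nat) : Int)

def calculate_trap_kos_alt (timeline : List (List (String × List (String × String)))) : List (String × Int) :=
  let p1k := trapCount timeline "p2_pokemon_state" "p1_move_details"
  let p2k := trapCount timeline "p1_pokemon_state" "p2_move_details"
  [("trap_ko_advantage", p1k - p2k)]

-- ===== PRECONDITION & SPEC =====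
-- Pre_ excludes exactly the timelines on which Python A raises KeyError: a turn whose
-- (truthy) state dict has status 'fnt' but no 'name' key.
def Pre_calculate_trap_kos (timeline : List (List (String × List (String × String)))) : Prop :=
  ∀ turn ∈ timeline, ∀ k ∈ ["p1_pokemon_state", "p2_pokemon_state"],
    (pvTruthy (pvGetK turn k) && (pvField (pvGetK turn k) "status" == some "fnt")) = true →
      (pvField (pvGetK turn k) "name").isSome = true

instance (timeline : List (List (String × List (String × String)))) : Decidable (Pre_calculate_trap_kos timeline) := by
  unfold Pre_calculate_trap_kos; infer_instance

def pvWitness_calculate_trap_kos : (List (List (String × List (String × String)))) :=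
  [[("p1_pokemon_state", [("status", "fnt"), ("name", "pika")]),
    ("p2_move_details", [("name", "counter")])]]

def Spec_calculate_trap_kos (timeline : List (List (String × List (String × String)))) (out : List (String × Int)) : Prop := out = calculate_trap_kos_alt timeline
instance (timeline : List (List (String × List (String × String)))) (out : List (String × Int)) : Decidable (Spec_calculate_trap_kos timeline out) := by unfold Spec_calculate_trap_kos; infer_instance

-- ===== CLAIM (what is proved, stated in full; the proofs are below) =====
def Claim_equal_calculate_trap_kos : Prop := ∀ (timeline : List (List (String × List (String × String)))), Dom_calculate_trap_kos timeline → Pre_calculate_trap_kos timeline → Spec_calculate_trap_kos timeline (calculate_trap_kos timeline)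

-- ===== LEMMAS AND PROOFS =====

-- countP respects pointwise equality on members (no countP_congr in this Mathlib)
theorem countP_congr_mem {α : Type} (l : List α) (p q : α → Bool)
    (h : ∀ x ∈ l, p x = q x) : l.countP p = l.countP q := by
  induction l with
  | nil => rfl
  | cons a t ih =>
      simp [List.countP_cons, h a (by simp), ih fun x hx => h x (by simp [hx])]

-- one turn extends the collected names exactly when it is a fresh faint
theorem collectNames_append (l : List (List (String × List (String × String))))
    (t : List (String × List (String × String))) (sk : String) :
    collectNames (l ++ [t]) sk =
      (if (pvTruthy (pvGetK t sk) && (pvField (pvGetK t sk) "status" == some "fnt")) = true then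
         if pvName (pvGetK t sk) ∈ collectNames l sk then collectNames l sk
         else collectNames l sk ++ [pvName (pvGetK t sk)]
       else collectNames l sk) := by
  simp only [collectNames, List.foldl_append, List.foldl_cons, List.foldl_nil]

-- under a truthy fainted state, faintPred names exactly that turn's fainted pokemon
theorem faintPred_iff (t : List (String × List (String × String))) (sk n : String)
    (hc : (pvTruthy (pvGetK t sk) && (pvField (pvGetK t sk) "status" == some "fnt")) = true) :
    faintPred sk n t = true ↔ n = pvName (pvGetK t sk) := by
  unfold faintPred
  simp only [Bool.and_eq_true, beq_iff_eq] at hc ⊢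
  constructor
  · rintro ⟨_, h⟩; exact h.symm
  · rintro rfl; exact ⟨⟨hc.1, by simp [hc.2]⟩, rfl⟩

-- a turn with no truthy fainted state faints no name
theorem faintPred_false (t : List (String × List (String × String))) (sk n : String)
    (hc : (pvTruthy (pvGetK t sk) && (pvField (pvGetK t sk) "status" == some "fnt")) = false) :
    faintPred sk n t = false := by
  unfold faintPred
  rcases Bool.and_eq_false_iff.1 hc with h | h <;> simp [h]

-- membership in the collected names = some turn faints that name
theorem mem_collectNames_iff (l : List (List (String × List (String × String))))
    (sk n : String) :
    n ∈ collectNames l sk ↔ ∃ t ∈ l, faintPred sk n t = true := by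
  induction l using List.reverseRecOn with
  | nil => simp [collectNames]
  | append_singleton l t ih =>
    rw [collectNames_append]
    by_cases hc : (pvTruthy (pvGetK t sk) && (pvField (pvGetK t sk) "status" == some "fnt")) = true
    · by_cases hm : pvName (pvGetK t sk) ∈ collectNames l sk
      · rw [if_pos hc, if_pos hm, ih]
        constructor
        · rintro ⟨u, hu, hp⟩
          exact ⟨u, List.mem_append_left _ hu, hp⟩
        · rintro ⟨u, hu, hp⟩
          rcases List.mem_append.1 hu with hu | hu
          · exact ⟨u, hu, hp⟩
          · have hut : u = t := List.mem_singleton.1 hu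
            subst hut
            have hn := (faintPred_iff u sk n hc).1 hp
            exact ih.1 (by rw [hn]; exact hm)
      · rw [if_pos hc, if_neg hm]
        constructor
        · intro h
          rcases List.mem_append.1 h with h | h
          · obtain ⟨u, hu, hp⟩ := ih.1 h
            exact ⟨u, List.mem_append_left _ hu, hp⟩
          · have hn : n = pvName (pvGetK t sk) := List.mem_singleton.1 h
            exact ⟨t, List.mem_append_right _ (by simp), (faintPred_iff t sk n hc).2 hn⟩
        · rintro ⟨u, hu, hp⟩
          rcases List.mem_append.1 hu with hu | hu
          · exact List.mem_append_left _ (ih.2 ⟨u, hu, hp⟩)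
          · have hut : u = t := List.mem_singleton.1 hu
            subst hut
            exact List.mem_append_right _ (by simp [(faintPred_iff u sk n hc).1 hp])
    · have hc' : (pvTruthy (pvGetK t sk) && (pvField (pvGetK t sk) "status" == some "fnt")) = false :=
        Bool.eq_false_iff.2 hc
      rw [if_neg (by simp [hc']), ih]
      constructor
      · rintro ⟨u, hu, hp⟩
        exact ⟨u, List.mem_append_left _ hu, hp⟩
      · rintro ⟨u, hu, hp⟩
        rcases List.mem_append.1 hu with hu | hu
        · exact ⟨u, hu, hp⟩
        · have hut : u = t := List.mem_singleton.1 hu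
          subst hut
          rw [faintPred_false u sk n hc'] at hp
          cases hp

-- appending a turn does not change trapHit for names whose first faint is already in l
theorem trapHit_append_of_mem (l : List (List (String × List (String × String))))
    (t : List (String × List (String × String))) (sk mk n : String)
    (h : n ∈ collectNames l sk) :
    trapHit (l ++ [t]) sk mk n = trapHit l sk mk n := by
  obtain ⟨u, hu, hp⟩ := (mem_collectNames_iff l sk n).1 h
  have hsome : (l.find? (faintPred sk n)).isSome := List.find?_isSome.2 ⟨u, hu, hp⟩
  unfold trapHit
  rw [List.find?_append]
  cases hf : l.find? (faintPred sk n) with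
  | none => rw [hf] at hsome; cases hsome
  | some v => simp [Option.or]

-- a turn that faints no one leaves every trapHit unchanged
theorem trapHit_append_of_not_faint (l : List (List (String × List (String × String))))
    (t : List (String × List (String × String))) (sk mk n : String)
    (h : (pvTruthy (pvGetK t sk) && (pvField (pvGetK t sk) "status" == some "fnt")) = false) :
    trapHit (l ++ [t]) sk mk n = trapHit l sk mk n := by
  unfold trapHit
  rw [List.find?_append]
  have hp : faintPred sk n t = false := faintPred_false t sk n h
  cases hf : l.find? (faintPred sk n) with
  | none => simp [Option.or, List.find?, hp]
  | some v => simp [Option.or]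

-- a fresh faint's trapHit is decided at the new turn
theorem trapHit_append_of_fresh (l : List (List (String × List (String × String))))
    (t : List (String × List (String × String))) (sk mk : String)
    (hf : (pvTruthy (pvGetK t sk) && (pvField (pvGetK t sk) "status" == some "fnt")) = true)
    (hm : pvName (pvGetK t sk) ∉ collectNames l sk) :
    trapHit (l ++ [t]) sk mk (pvName (pvGetK t sk)) =
      (pvTruthy (pvGetK t mk) && pvTrapOpt (pvField (pvGetK t mk) "name")) := by
  have hnone : l.find? (faintPred sk (pvName (pvGetK t sk))) = none := by
    rw [List.find?_eq_none]
    intro u hu hpu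
    exact hm ((mem_collectNames_iff l sk _).2 ⟨u, hu, hpu⟩)
  have hpt : faintPred sk (pvName (pvGetK t sk)) t = true :=
    (faintPred_iff t sk _ hf).2 rfl
  unfold trapHit
  rw [List.find?_append, hnone]
  simp [Option.or, List.find?, hpt]

-- the single-turn update of one player's (counter, set) in A, named for reuse
def countUpd (k : Int) (mv st : Option (List (String × String))) (f : PySem.Set String) : Int :=
  if pvTruthy mv && pvTruthy st && pvTrapOpt (pvField mv "name") then
    if (pvField st "status" == some "fnt") && !(PySem.Set.contains f (pvName st)) then k + 1 else k
  else k

def setUpd (f : PySem.Set String) (mv st : Option (List (String × String))) : PySem.Set String :=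
  let f1 :=
    if pvTruthy mv && pvTruthy st && pvTrapOpt (pvField mv "name") then
      if (pvField st "status" == some "fnt") && !(PySem.Set.contains f (pvName st)) then
        PySem.Set.add f (pvName st)
      else f
    else f
  if pvTruthy st && (pvField st "status" == some "fnt") then PySem.Set.add f1 (pvName st) else f1

theorem stepA_eq (p1k p2k : Int) (f1 f2 : PySem.Set String)
    (t : List (String × List (String × String))) :
    stepA (p1k, p2k, f1, f2) t =
      (countUpd p1k (pvGetK t "p1_move_details") (pvGetK t "p2_pokemon_state") f2,
       countUpd p2k (pvGetK t "p2_move_details") (pvGetK t "p1_pokemon_state") f1,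
       setUpd f1 (pvGetK t "p2_move_details") (pvGetK t "p1_pokemon_state"),
       setUpd f2 (pvGetK t "p1_move_details") (pvGetK t "p2_pokemon_state")) := rfl

-- A's two set updates collapse to: add the name iff the state is a truthy faint
theorem setUpd_eq (f : PySem.Set String) (mv st : Option (List (String × String))) :
    setUpd f mv st =
      if (pvTruthy st && (pvField st "status" == some "fnt")) = true then
        PySem.Set.add f (pvName st)
      else f := by
  unfold setUpd
  by_cases hs : (pvTruthy st && (pvField st "status" == some "fnt")) = true
  · rw [if_pos hs, if_pos hs]
    by_cases htrap : (pvTruthy mv && pvTruthy st && pvTrapOpt (pvField mv "name")) = true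
    · rw [if_pos htrap]
      by_cases hm : pvName st ∈ f
      · rw [if_neg (by simp [hm])]
      · have hfnt : (pvField st "status" == some "fnt") = true := by
          have h := hs; rw [Bool.and_eq_true] at h; exact h.2
        rw [if_pos (by simp [hfnt, hm])]
        exact PySem.Set.add_of_mem (by simp [PySem.Set.mem_add])
    · rw [if_neg htrap]
  · rw [if_neg hs, if_neg hs]
    by_cases htrap : (pvTruthy mv && pvTruthy st && pvTrapOpt (pvField mv "name")) = true
    · rw [if_pos htrap]
      have ht : pvTruthy st = true := by
        have h := htrap; rw [Bool.and_eq_true, Bool.and_eq_true] at h; exact h.1.2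
      have hfnt' : (pvField st "status" == some "fnt") = false := by
        rcases Bool.and_eq_false_iff.1 (Bool.eq_false_iff.2 hs) with h | h
        · rw [ht] at h; cases h
        · exact h
      rw [if_neg (by simp [hfnt'])]
    · rw [if_neg htrap]

-- the per-side correspondence: A's counter update = B's per-name count on the extended list
theorem countUpd_eq (l : List (List (String × List (String × String))))
    (t : List (String × List (String × String))) (sk mk : String) :
    countUpd (trapCount l sk mk) (pvGetK t mk) (pvGetK t sk) (collectNames l sk) =
      trapCount (l ++ [t]) sk mk := by
  by_cases hs : (pvTruthy (pvGetK t sk) && (pvField (pvGetK t sk) "status" == some "fnt")) = true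
  · by_cases hm : pvName (pvGetK t sk) ∈ collectNames l sk
    · -- already-fainted name: nothing changes on either side
      have hnames : collectNames (l ++ [t]) sk = collectNames l sk := by
        rw [collectNames_append, if_pos hs, if_pos hm]
      have hcnt : (collectNames l sk).countP (trapHit (l ++ [t]) sk mk) =
          (collectNames l sk).countP (trapHit l sk mk) :=
        countP_congr_mem _ _ _ fun n hn => trapHit_append_of_mem l t sk mk n hn
      unfold countUpd trapCount
      rw [hnames, hcnt]
      by_cases htrap : (pvTruthy (pvGetK t mk) && pvTruthy (pvGetK t sk) && pvTrapOpt (pvField (pvGetK t mk) "name")) = true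
      · rw [if_pos htrap, if_neg (by simp [hm])]
      · rw [if_neg htrap]
    · -- fresh faint: B gains one name, counted iff the opposing move is a trap move
      have hnames : collectNames (l ++ [t]) sk = collectNames l sk ++ [pvName (pvGetK t sk)] := by
        rw [collectNames_append, if_pos hs, if_neg hm]
      have hcnt : (collectNames l sk).countP (trapHit (l ++ [t]) sk mk) =
          (collectNames l sk).countP (trapHit l sk mk) :=
        countP_congr_mem _ _ _ fun n hn => trapHit_append_of_mem l t sk mk n hn
      have hnew := trapHit_append_of_fresh l t sk mk hs hm
      have htr : pvTruthy (pvGetK t sk) = true := by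
        have h := hs; rw [Bool.and_eq_true] at h; exact h.1
      have hst : (pvField (pvGetK t sk) "status" == some "fnt") = true := by
        have h := hs; rw [Bool.and_eq_true] at h; exact h.2
      unfold countUpd trapCount
      rw [hnames, List.countP_append, hcnt]
      by_cases hmv : (pvTruthy (pvGetK t mk) && pvTrapOpt (pvField (pvGetK t mk) "name")) = true
      · have h1 : pvTruthy (pvGetK t mk) = true := by
          have h := hmv; rw [Bool.and_eq_true] at h; exact h.1
        have h2 : pvTrapOpt (pvField (pvGetK t mk) "name") = true := by
          have h := hmv; rw [Bool.and_eq_true] at h; exact h.2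
        rw [if_pos (by simp [h1, h2, htr]), if_pos (by simp [hst, hm])]
        rw [List.countP_singleton, if_pos (by rw [hnew]; simp [h1, h2])]
        push_cast
        ring
      · have hmv' : (pvTruthy (pvGetK t mk) && pvTrapOpt (pvField (pvGetK t mk) "name")) = false :=
          Bool.eq_false_iff.2 hmv
        have houter : (pvTruthy (pvGetK t mk) && pvTruthy (pvGetK t sk) && pvTrapOpt (pvField (pvGetK t mk) "name")) = false := by
          rcases Bool.and_eq_false_iff.1 hmv' with h | h
          · simp [h]
          · simp [h]
        rw [if_neg (by simp [houter]), List.countP_singleton,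
          if_neg (by rw [hnew, hmv']; simp)]
        simp
  · -- no faint for this player: both sides unchanged
    have hs' : (pvTruthy (pvGetK t sk) && (pvField (pvGetK t sk) "status" == some "fnt")) = false :=
      Bool.eq_false_iff.2 hs
    have hnames : collectNames (l ++ [t]) sk = collectNames l sk := by
      rw [collectNames_append, if_neg (by simp [hs'])]
    have hcnt : (collectNames l sk).countP (trapHit (l ++ [t]) sk mk) =
        (collectNames l sk).countP (trapHit l sk mk) :=
      countP_congr_mem _ _ _ fun n _ => trapHit_append_of_not_faint l t sk mk n hs'
    unfold countUpd trapCount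
    rw [hnames, hcnt]
    by_cases htrap : (pvTruthy (pvGetK t mk) && pvTruthy (pvGetK t sk) && pvTrapOpt (pvField (pvGetK t mk) "name")) = true
    · have ht : pvTruthy (pvGetK t sk) = true := by
        have h := htrap; rw [Bool.and_eq_true, Bool.and_eq_true] at h; exact h.1.2
      have hfnt'' : (pvField (pvGetK t sk) "status" == some "fnt") = false := by
        rcases Bool.and_eq_false_iff.1 hs' with h | h
        · rw [ht] at h; cases h
        · exact h
      rw [if_pos htrap, if_neg (by simp [hfnt''])]
    · rw [if_neg htrap]

-- the main invariant: A's whole fold state is B's staged quantities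
theorem mainInv (tl : List (List (String × List (String × String)))) :
    tl.foldl stepA (0, 0, PySem.Set.empty, PySem.Set.empty) =
      (trapCount tl "p2_pokemon_state" "p1_move_details",
       trapCount tl "p1_pokemon_state" "p2_move_details",
       collectNames tl "p1_pokemon_state",
       collectNames tl "p2_pokemon_state") := by
  induction tl using List.reverseRecOn with
  | nil => rfl
  | append_singleton l t ih =>
      rw [List.foldl_append, List.foldl_cons, List.foldl_nil, ih, stepA_eq,
        setUpd_eq, setUpd_eq, countUpd_eq, countUpd_eq]
      refine congrArg₂ _ rfl (congrArg₂ _ rfl (congrArg₂ _ ?_ ?_)) <;>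
        rw [collectNames_append] <;>
        simp only [PySem.Set.add_eq_ite]

-- ===== VERDICT (by name: the statement is the Claim_ definition above) =====
theorem calculate_trap_kos_spec : Claim_equal_calculate_trap_kos := by
  intro timeline _ _
  unfold Spec_calculate_trap_kos calculate_trap_kos calculate_trap_kos_alt
  rw [mainInv]
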